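-- pv_equiv track=rewrite | github.com/eninn/codingtest_training | 해시/폰켓몬.py | solution
-- ===== SOURCE A (Python) =====
-- from typing import List
--
-- def solution(nums:List[int]):
--     answer = 0
--
--     # 입력받은 폰켓몬 수를 딕셔너리로 구성.
--     pokemon_dict = {}
--     for p in nums:
--         if p in pokemon_dict:
--             pokemon_dict[p] += 1
--         else:
--             pokemon_dict[p] = 1
--
--     pokemon_num = len(pokemon_dict.keys())
--     # 전체 폰켓몬 길이 len(nums)/2 만큼 반복하면서 딕셔너리를 순서대로 돌면서 저장된 폰켓몬 수를 하나씩 제거.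
--     # 특정 key에서 폰켓몬이 제거될때마다 answer 값을 하나씩 올리고 모든 폰켓몬 수만큼 되었으면 즉시 return
--     cycles = len(nums) // 2
--     poke_roop = list(pokemon_dict.keys())
--     while cycles > 0:
--         if not poke_roop:
--             poke_roop =  list(pokemon_dict.keys())
--         if answer == pokemon_num:
--             return answer
--
--         pokemon = poke_roop.pop()
--
--         if pokemon_dict[pokemon] > 0:
--             pokemon_dict[pokemon] -= 1
--             answer += 1
--         cycles -= 1
--
--     return answer
-- ===== SOURCE B (Python) =====
-- def solution(nums):
--     return min(len(set(nums)), len(nums) // 2)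
-- ===== Notes on version B (the rewrite author's own statement) =====
-- stated objective: simpler
-- what changed: Replaced the counting-dict build plus the capping while-loop (popping keys one by one) with the closed form min(len(set(nums)), len(nums)//2).
import Mathlib
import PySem

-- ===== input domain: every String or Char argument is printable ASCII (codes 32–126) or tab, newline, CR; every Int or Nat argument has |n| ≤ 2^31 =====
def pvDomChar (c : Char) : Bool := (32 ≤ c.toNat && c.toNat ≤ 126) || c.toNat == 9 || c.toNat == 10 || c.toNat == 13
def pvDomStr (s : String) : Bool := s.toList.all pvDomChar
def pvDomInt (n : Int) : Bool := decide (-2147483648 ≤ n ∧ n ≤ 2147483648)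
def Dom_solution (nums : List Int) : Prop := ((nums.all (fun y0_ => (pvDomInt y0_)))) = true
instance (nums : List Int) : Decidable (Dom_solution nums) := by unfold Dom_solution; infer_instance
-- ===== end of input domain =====

-- B replaces A's counting-dict build and key-popping while-loop by the closed form
-- min(len(set(nums)), len(nums)//2); equivalence of return values is proved below.

-- ===== PORT A =====
-- the counting-dict build loop: for p in nums: if p in d: d[p]+=1 else d[p]=1
def solutionDict (nums : List Int) : PySem.Dict Int Int :=
  nums.foldl
    (fun d p => if d.contains p then d.insert p (d.getD p 0 + 1) else d.insert p 1)
    PySem.Dict.empty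

-- the while-loop, fueled by `cycles` (it decrements cycles by exactly 1 per iteration,
-- so the fuel is exact).  `roop.getLast? = none` (pop from an empty refilled list) is
-- unreachable: the refill list d.keys is empty only when nums = [], and then cycles = 0.
def solutionLoop (cycles : Nat) (d : PySem.Dict Int Int) (roop : List Int)
    (answer : Int) (pokemon_num : Int) : Int :=
  match cycles with
  | 0 => answer
  | c + 1 =>
    let roop := if roop.isEmpty then d.keys else roop
    if answer = pokemon_num then answer
    else
      match roop.getLast? with
      | none => answer  -- unreachable guard (Python would raise IndexError here)
      | some pokemon =>
        let roop' := roop.dropLast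
        if d.getD pokemon 0 > 0 then
          solutionLoop c (d.insert pokemon (d.getD pokemon 0 - 1)) roop' (answer + 1) pokemon_num
        else
          solutionLoop c d roop' answer pokemon_num

def solution (nums : List Int) : Int :=
  let pokemon_dict := solutionDict nums
  let pokemon_num : Int := pokemon_dict.keys.length
  let cycles : Nat := nums.length / 2
  solutionLoop cycles pokemon_dict pokemon_dict.keys 0 pokemon_num

-- ===== PORT B =====
def solution_alt (nums : List Int) : Int :=
  min ((PySem.Set.ofList nums).length : Int) (PySem.Int.floordiv (nums.length : Int) 2)

-- ===== PRECONDITION & SPEC =====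
def Spec_solution (nums : List Int) (out : Int) : Prop := out = solution_alt nums
instance (nums : List Int) (out : Int) : Decidable (Spec_solution nums out) := by unfold Spec_solution; infer_instance

-- ===== CLAIM (what is proved, stated in full; the proofs are below) =====
def Claim_equal_solution : Prop := ∀ (nums : List Int), Dom_solution nums → Spec_solution nums (solution nums)

-- ===== LEMMAS AND PROOFS =====

-- A's build loop is collections.Counter: the `if p in d` split collapses.
theorem solutionDict_eq_counter (nums : List Int) :
    solutionDict nums = PySem.Dict.counter nums := by
  have h : solutionDict nums
      = nums.foldl (fun d x => d.insert x (d.getD x 0 + 1)) PySem.Dict.empty := by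
    unfold solutionDict
    congr 1
    funext d p
    by_cases h : d.contains p = true
    · simp [h]
    · have h0 : d.getD p 0 = 0 := PySem.Dict.getD_of_not_contains d 0 (by simpa using h)
      simp [h, h0]
  rw [h, PySem.Dict.foldl_insert_getD_add_one_eq_counter]

-- loop invariant: `roop` holds distinct keys of d with positive counts and
-- answer + |roop| = pokemon_num; the loop then computes min pokemon_num (answer + cycles).
theorem solutionLoop_eq (c : Nat) (d : PySem.Dict Int Int) (roop : List Int)
    (answer : Int)
    (hnd : roop.Nodup)
    (hmem : ∀ k ∈ roop, k ∈ d.keys)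
    (hpos : ∀ k ∈ roop, d.getD k 0 > 0)
    (hsum : answer + roop.length = (d.keys.length : Int)) :
    solutionLoop c d roop answer (d.keys.length : Int)
      = min (d.keys.length : Int) (answer + (c : Int)) := by
  induction c generalizing d roop answer with
  | zero =>
    have hlen : (0 : Int) ≤ roop.length := by positivity
    simp [solutionLoop]
    omega
  | succ c ih =>
    match hroop : roop with
    | [] =>
      -- answer already equals pokemon_num; refill then immediate return
      have : answer = (d.keys.length : Int) := by simpa using hsum
      simp [solutionLoop, this]
      omega
    | p0 :: rest =>
      have hne : (p0 :: rest) ≠ ([] : List Int) := by simp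
      have hlast : (p0 :: rest).getLast? = some ((p0 :: rest).getLast hne) :=
        List.getLast?_eq_some_getLast hne
      by_cases hans : answer = (d.keys.length : Int)
      · simp [solutionLoop, hans]
        omega
      · -- pop the last key; its count is positive, so decrement and recurse
        set q := (p0 :: rest).getLast hne with hq
        have hqmem : q ∈ p0 :: rest := List.getLast_mem hne
        have hsplit : (p0 :: rest).dropLast ++ [q] = p0 :: rest :=
          List.dropLast_append_getLast hne
        have hqpos : d.getD q 0 > 0 := hpos q hqmem
        have hqkeys : q ∈ d.keys := hmem q hqmem
        have hqcont : d.contains q = true :=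
          (PySem.Dict.contains_iff_mem_keys _ _).mpr hqkeys
        have hkeys' : (d.insert q (d.getD q 0 - 1)).keys = d.keys :=
          PySem.Dict.keys_insert_of_contains d (d.getD q 0 - 1) hqcont
        have hq_not_mem : q ∉ (p0 :: rest).dropLast := by
          have := hnd
          rw [← hsplit] at this
          exact fun hmem' => (List.nodup_append.mp this).2.2 _ hmem' q (by simp) rfl
        have hnd' : ((p0 :: rest).dropLast).Nodup := by
          have := hnd
          rw [← hsplit] at this
          exact (List.nodup_append.mp this).1
        have hlen' : ((p0 :: rest).dropLast).length + 1 = (p0 :: rest).length := by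
          simp
        have hrec := ih (d.insert q (d.getD q 0 - 1)) ((p0 :: rest).dropLast) (answer + 1)
          hnd'
          (by intro k hk
              rw [hkeys']
              exact hmem k (by rw [← hsplit]; exact List.mem_append_left _ hk))
          (by intro k hk
              have hkq : k ≠ q := fun h => hq_not_mem (h ▸ hk)
              rw [PySem.Dict.getD_insert_of_ne _ _ _ hkq]
              exact hpos k (by rw [← hsplit]; exact List.mem_append_left _ hk))
          (by rw [hkeys']; omega)
        rw [hkeys'] at hrec
        simp only [solutionLoop, List.isEmpty_cons, Bool.false_eq_true, if_false,
          if_neg hans, hlast, if_pos hqpos, hrec]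
        omega

theorem solution_spec : Claim_equal_solution := by
  intro nums _
  unfold Spec_solution solution solution_alt
  rw [solutionDict_eq_counter]
  have hkeys : (PySem.Dict.counter nums).keys = PySem.Set.ofList nums :=
    PySem.Dict.keys_counter nums
  have hloop := solutionLoop_eq (nums.length / 2) (PySem.Dict.counter nums)
    (PySem.Dict.counter nums).keys 0
    (PySem.Dict.nodup_keys_counter nums)
    (fun k hk => hk)
    (by intro k hk
        rw [PySem.Dict.getD_counter]
        have : k ∈ nums := by
          rw [hkeys] at hk
          exact (PySem.Set.mem_ofList _ _).mp hk
        exact_mod_cast List.count_pos_iff.mpr this)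
    (by simp)
  rw [hkeys] at hloop
  simp only []
  rw [hkeys, hloop, zero_add,
    show PySem.Int.floordiv (nums.length : Int) 2 = ((nums.length / 2 : Nat) : Int) from
      by exact_mod_cast PySem.Int.floordiv_natCast nums.length 2]
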